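-- pv_equiv track=rewrite | github.com/siddu-fungible/discovey | tools/Spirent_TestCenter_4.81/Spirent_TestCenter_Application_Linux/Methodology/Packages/SILVER_PEAK_POC/configure_traffic.py | verify_acl_rule_match_criteria_is_supported
-- ===== SOURCE A (Python) =====
-- def verify_acl_rule_match_criteria_is_supported(acl):
--     # Supported ACL Match Critera:
--     # IP Intelligence
--     #   either_service, src_service, dst_service
--     # Domain
--     #   either_dns, src_dns, dst_dns
--     # Geo Location
--     #   either_geo, src_geo, dst_geo
--     # Application (can be any)
--     #   application
--     # Interface (can be any)
--     #   vlan
--     # Protocol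
--     #   protocol
--     # DSCP (can be any)
--     #   dscp
--     # IP/Subnet
--     #   src_ip, dst_ip
--     # Port (only when protocol=tcp|udp; can be 0)
--     #   either_port, src_port, dst_port
--
--     # For now we'll support
--     # protocol = ip | tcp | udp
--     # either_port, src_port, dst_port > 0
--
--     unsupported_names = ["IP Intelligence", "IP Intelligence", "IP Intelligence",
--                          "Domain", "Domain", "Domain",
--                          "Geo Location", "Geo Location", "Geo Location",
--                          "IP/Subnet", "IP/Subnet"]
--     unsupported_keys = ["either_service", "src_service", "dst_service",
--                         "either_dns", "src_dns", "dst_dns",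
--                         "either_geo", "src_geo", "dst_geo",
--                         "src_ip", "dst_ip"]
--
--     for i, unsupported in enumerate(unsupported_keys):
--         if acl.get(unsupported, "") != "":
--             return unsupported_names[i] + " match criteria currently not supported"
--
--     application = acl.get("application", "")
--     if application != "" and application != "any" and application != "http":
--         return "Application match criteria " + application + " currently not supported"
--
--     interface = acl.get("vlan", "")
--     if interface != "" and interface != "any":
--         return "Interface match criteria " + interface + " currently not supported"
--
--     protocol = acl.get("protocol", "")
--     if protocol != "" and protocol != "ip" and protocol != "tcp" and protocol != "udp":
--         return "Supported Protocol match criteria are ip, tcp and udp. " + \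
--                "All others currently not supported"
--
--     dscp = acl.get("dscp", "")
--     if dscp != "" and dscp != "any":
--         return "DSCP match criteria " + dscp + " currently not supported"
--
--     return ""
-- ===== SOURCE B (Python) =====
-- _RANK = {"either_service": 0, "src_service": 1, "dst_service": 2,
--          "either_dns": 3, "src_dns": 4, "dst_dns": 5,
--          "either_geo": 6, "src_geo": 7, "dst_geo": 8,
--          "src_ip": 9, "dst_ip": 10,
--          "application": 11, "vlan": 12, "protocol": 13, "dscp": 14}
--
-- _CATEGORY = ["IP Intelligence", "IP Intelligence", "IP Intelligence",
--              "Domain", "Domain", "Domain",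
--              "Geo Location", "Geo Location", "Geo Location",
--              "IP/Subnet", "IP/Subnet"]
--
--
-- def _allowed(rank, value):
--     if value == "":
--         return True
--     if rank <= 10:
--         return False
--     if rank == 11:
--         return value == "any" or value == "http"
--     if rank == 13:
--         return value == "ip" or value == "tcp" or value == "udp"
--     return value == "any"
--
--
-- def verify_acl_rule_match_criteria_is_supported(acl):
--     # Scan the ACL's own entries once, keeping the highest-priority (lowest-rank)
--     # violating entry, and build its message afterwards. Correct because a
--     # criterion only fails when its key is present with a disallowed value
--     # (an absent key yields "", which every criterion allows), and the original
--     # reports the first failing criterion in its fixed order = the minimal rank.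
--     best = None
--     for key, value in acl.items():
--         rank = _RANK.get(key)
--         if rank is not None and not _allowed(rank, value):
--             if best is None or rank < best[0]:
--                 best = (rank, value)
--     if best is None:
--         return ""
--     rank, value = best
--     if rank <= 10:
--         return _CATEGORY[rank] + " match criteria currently not supported"
--     if rank == 11:
--         return "Application match criteria " + value + " currently not supported"
--     if rank == 12:
--         return "Interface match criteria " + value + " currently not supported"
--     if rank == 13:
--         return ("Supported Protocol match criteria are ip, tcp and udp. "
--                 "All others currently not supported")
--     return "DSCP match criteria " + value + " currently not supported"
-- ===== Notes on version B (the rewrite author's own statement) =====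
-- stated objective: alternative
-- what changed: Instead of probing the dict with 15 lookups in priority order and returning at the first failure, B makes a single pass over the ACL's own entries, keeping the minimum-rank violating entry via a priority map, and builds the message at the end.
import Mathlib
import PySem

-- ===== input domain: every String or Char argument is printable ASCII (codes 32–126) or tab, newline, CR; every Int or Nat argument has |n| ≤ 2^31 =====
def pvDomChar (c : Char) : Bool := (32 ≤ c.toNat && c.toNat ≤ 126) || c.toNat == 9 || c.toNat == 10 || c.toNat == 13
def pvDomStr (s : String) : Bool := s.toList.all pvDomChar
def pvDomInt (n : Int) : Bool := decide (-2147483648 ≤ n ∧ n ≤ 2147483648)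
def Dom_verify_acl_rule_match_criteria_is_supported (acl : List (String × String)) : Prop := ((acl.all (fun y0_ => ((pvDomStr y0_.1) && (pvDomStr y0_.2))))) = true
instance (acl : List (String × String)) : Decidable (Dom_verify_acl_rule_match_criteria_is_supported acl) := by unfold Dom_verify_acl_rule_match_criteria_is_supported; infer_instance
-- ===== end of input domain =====

-- B scans the ACL's own entries once, keeping the minimum-rank violating entry via a priority map, instead of A's 15 ordered lookups with early return (alternative decomposition, same cost).


-- ===== PORT A =====
-- literal transliteration of A: enumerate-loop over the parallel key/name lists, then four guard blocks
def pvUnsupportedNames : List String :=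
  ["IP Intelligence", "IP Intelligence", "IP Intelligence",
   "Domain", "Domain", "Domain",
   "Geo Location", "Geo Location", "Geo Location",
   "IP/Subnet", "IP/Subnet"]

def pvUnsupportedKeys : List String :=
  ["either_service", "src_service", "dst_service",
   "either_dns", "src_dns", "dst_dns",
   "either_geo", "src_geo", "dst_geo",
   "src_ip", "dst_ip"]

-- the 'for i, unsupported in enumerate(unsupported_keys)' loop: a hit returns early,
-- falling off the loop continues into the rest of the function body (pvAfterLoopA)
def pvAfterLoopA (acl : List (String × String)) : String :=
  let application := PySem.Dict.getD (PySem.Dict.mk acl) "application" ""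
  if application ≠ "" ∧ application ≠ "any" ∧ application ≠ "http" then
    "Application match criteria " ++ application ++ " currently not supported"
  else
    let interface := PySem.Dict.getD (PySem.Dict.mk acl) "vlan" ""
    if interface ≠ "" ∧ interface ≠ "any" then
      "Interface match criteria " ++ interface ++ " currently not supported"
    else
      let protocol := PySem.Dict.getD (PySem.Dict.mk acl) "protocol" ""
      if protocol ≠ "" ∧ protocol ≠ "ip" ∧ protocol ≠ "tcp" ∧ protocol ≠ "udp" then
        "Supported Protocol match criteria are ip, tcp and udp. " ++
          "All others currently not supported"
      else
        let dscp := PySem.Dict.getD (PySem.Dict.mk acl) "dscp" ""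
        if dscp ≠ "" ∧ dscp ≠ "any" then
          "DSCP match criteria " ++ dscp ++ " currently not supported"
        else ""

def pvLoopA (acl : List (String × String)) : List (Int × String) → String
  | [] => pvAfterLoopA acl
  | (i, unsupported) :: rest =>
      if PySem.Dict.getD (PySem.Dict.mk acl) unsupported "" ≠ "" then
        PySem.List.pyGetD pvUnsupportedNames i "" ++ " match criteria currently not supported"
      else pvLoopA acl rest

def verify_acl_rule_match_criteria_is_supported (acl : List (String × String)) : String :=
  pvLoopA acl (PySem.List.enumerate pvUnsupportedKeys)

-- ===== PORT B =====
-- B (see Source B): one pass over the ACL's own entries, keeping the minimum-rank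
-- violating entry (strict '<', so the first occurrence of a rank wins a tie,
-- though ranks are unique per key), then building the message at the end.

-- _RANK: the priority map, a module-level dict literal
def pvRankPairs : List (String × Int) :=
  [("either_service", 0), ("src_service", 1), ("dst_service", 2),
   ("either_dns", 3), ("src_dns", 4), ("dst_dns", 5),
   ("either_geo", 6), ("src_geo", 7), ("dst_geo", 8),
   ("src_ip", 9), ("dst_ip", 10),
   ("application", 11), ("vlan", 12), ("protocol", 13), ("dscp", 14)]

def pvRank (k : String) : Option Int := PySem.Dict.get? (PySem.Dict.mk pvRankPairs) k

-- _CATEGORY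
def pvCategory : List String :=
  ["IP Intelligence", "IP Intelligence", "IP Intelligence",
   "Domain", "Domain", "Domain",
   "Geo Location", "Geo Location", "Geo Location",
   "IP/Subnet", "IP/Subnet"]

-- _allowed(rank, value)
def pvAllowedB (rank : Int) (value : String) : Bool :=
  if value = "" then true
  else if rank ≤ 10 then false
  else if rank = 11 then (value == "any" || value == "http")
  else if rank = 13 then (value == "ip" || value == "tcp" || value == "udp")
  else value == "any"

-- the body of 'for key, value in acl.items(): ...'
def pvStep (best : Option (Int × String)) (kv : String × String) : Option (Int × String) :=
  match pvRank kv.1 with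
  | none => best
  | some r =>
      if pvAllowedB r kv.2 then best
      else
        match best with
        | none => some (r, kv.2)
        | some b => if r < b.1 then some (r, kv.2) else best

-- the message built from 'best' after the loop; _CATEGORY[rank] is in range
-- (0 ≤ rank ≤ 10 in that branch), so pyGet? is some and .getD "" only totalizes
def pvMessage : Option (Int × String) → String
  | none => ""
  | some (r, v) =>
      if r ≤ 10 then
        (PySem.List.pyGet? pvCategory r).getD "" ++ " match criteria currently not supported"
      else if r = 11 then "Application match criteria " ++ v ++ " currently not supported"
      else if r = 12 then "Interface match criteria " ++ v ++ " currently not supported"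
      else if r = 13 then
        "Supported Protocol match criteria are ip, tcp and udp. " ++
          "All others currently not supported"
      else "DSCP match criteria " ++ v ++ " currently not supported"

-- acl.items(): the dict view of the association list under the convention
-- (lookup = first match) — each key once, with its first value
def pvItems : List (String × String) → List String → List (String × String)
  | [], _ => []
  | (k, v) :: rest, seen =>
      if k ∈ seen then pvItems rest seen else (k, v) :: pvItems rest (k :: seen)

def verify_acl_rule_match_criteria_is_supported_alt (acl : List (String × String)) : String :=
  pvMessage ((pvItems acl []).foldl pvStep none)

-- ===== PRECONDITION & SPEC =====
def Spec_verify_acl_rule_match_criteria_is_supported (acl : List (String × String)) (out : String) : Prop := out = verify_acl_rule_match_criteria_is_supported_alt acl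
instance (acl : List (String × String)) (out : String) : Decidable (Spec_verify_acl_rule_match_criteria_is_supported acl out) := by unfold Spec_verify_acl_rule_match_criteria_is_supported; infer_instance

-- ===== CLAIM (what is proved, stated in full; the proofs are below) =====
def Claim_equal_verify_acl_rule_match_criteria_is_supported : Prop := ∀ (acl : List (String × String)), Dom_verify_acl_rule_match_criteria_is_supported acl → Spec_verify_acl_rule_match_criteria_is_supported acl (verify_acl_rule_match_criteria_is_supported acl)

-- ===== LEMMAS AND PROOFS =====

-- abbreviations used only by the proofs
def pvVal (acl : List (String × String)) (k : String) : String :=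
  PySem.Dict.getD (PySem.Dict.mk acl) k ""

-- the 15 checks in priority order, as (rank, current value) pairs
def pvS (acl : List (String × String)) : List (Int × String) :=
  pvRankPairs.map (fun p => (p.2, pvVal acl p.1))

-- what one loop iteration contributes
def pvCand (kv : String × String) : Option (Int × String) :=
  match pvRank kv.1 with
  | none => none
  | some r => if pvAllowedB r kv.2 then none else some (r, kv.2)

def pvMinPair (acc : Option (Int × String)) (p : Int × String) : Option (Int × String) :=
  match acc with
  | none => some p
  | some b => if p.1 < b.1 then some p else some b

-- first failing check of a priority-ordered list
def pvFirstFail : List (Int × String) → Option (Int × String)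
  | [] => none
  | (r, v) :: rest => if pvAllowedB r v then pvFirstFail rest else some (r, v)


theorem pvStep_eq (best : Option (Int × String)) (kv : String × String) :
    pvStep best kv = match pvCand kv with | none => best | some p => pvMinPair best p := by
  unfold pvStep pvCand pvMinPair
  cases pvRank kv.1 with
  | none => rfl
  | some r =>
    by_cases ha : pvAllowedB r kv.2
    · simp [ha]
    · simp only [ha, if_false, Bool.false_eq_true]
      cases best <;> rfl

theorem foldl_step_eq (m : List (String × String)) (acc : Option (Int × String)) :
    m.foldl pvStep acc = (m.filterMap pvCand).foldl pvMinPair acc := by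
  induction m generalizing acc with
  | nil => rfl
  | cons kv rest ih =>
    rw [List.foldl_cons, List.filterMap_cons, pvStep_eq]
    cases h : pvCand kv with
    | none => exact ih acc
    | some p => rw [List.foldl_cons]; exact ih (pvMinPair acc p)

theorem pvMinPair_ne_none (acc : Option (Int × String)) (p : Int × String) :
    pvMinPair acc p ≠ none := by
  cases acc with
  | none => simp [pvMinPair]
  | some b => by_cases h : p.1 < b.1 <;> simp [pvMinPair, h]

theorem minRun_none (C : List (Int × String)) (acc : Option (Int × String)) :
    C.foldl pvMinPair acc = none ↔ (acc = none ∧ C = []) := by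
  induction C generalizing acc with
  | nil => simp
  | cons p rest ih =>
    rw [List.foldl_cons, ih]
    simp [pvMinPair_ne_none]

theorem minRun_some (C : List (Int × String)) : ∀ (acc : Option (Int × String)) (q : Int × String),
    C.foldl pvMinPair acc = some q →
    (acc = some q ∨ q ∈ C) ∧ (∀ p ∈ C, q.1 ≤ p.1) ∧ (∀ b, acc = some b → q.1 ≤ b.1) := by
  induction C with
  | nil =>
    intro acc q h
    simp only [List.foldl_nil] at h
    refine ⟨Or.inl h, by simp, fun b hb => ?_⟩
    rw [h] at hb; cases hb; exact le_refl _
  | cons p rest ih =>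
    intro acc q h
    rw [List.foldl_cons] at h
    obtain ⟨h1, h2, h3⟩ := ih (pvMinPair acc p) q h
    have hq_le_p : q.1 ≤ p.1 := by
      cases acc with
      | none => exact h3 p rfl
      | some b =>
        by_cases hlt : p.1 < b.1
        · exact h3 p (by simp [pvMinPair, hlt])
        · have hb := h3 b (by simp [pvMinPair, hlt])
          omega
    refine ⟨?_, ?_, ?_⟩
    · rcases h1 with he | hm
      · cases acc with
        | none =>
          simp only [pvMinPair, Option.some.injEq] at he
          exact Or.inr (by rw [← he]; exact List.mem_cons_self)
        | some b =>
          by_cases hlt : p.1 < b.1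
          · simp only [pvMinPair, hlt, if_true] at he
            injection he with he
            exact Or.inr (by rw [← he]; exact List.mem_cons_self)
          · simp only [pvMinPair, hlt, if_false] at he
            exact Or.inl he
      · exact Or.inr (List.mem_cons_of_mem _ hm)
    · intro x hx
      rcases List.mem_cons.mp hx with rfl | hx'
      · exact hq_le_p
      · exact h2 x hx'
    · intro b hb
      cases acc with
      | none => cases hb
      | some b' =>
        injection hb with hb; subst hb
        by_cases hlt : p.1 < b'.1
        · have := h3 p (by simp [pvMinPair, hlt]); omega
        · have := h3 b' (by simp [pvMinPair, hlt]); omega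

theorem ff_none (S : List (Int × String)) :
    pvFirstFail S = none ↔ ∀ p ∈ S, pvAllowedB p.1 p.2 = true := by
  induction S with
  | nil => simp [pvFirstFail]
  | cons p rest ih =>
    obtain ⟨r, v⟩ := p
    by_cases ha : pvAllowedB r v <;> simp [pvFirstFail, ha, ih]

theorem ff_some (S : List (Int × String)) : S.Pairwise (fun p q => p.1 < q.1) →
    ∀ (q : Int × String), pvFirstFail S = some q →
    q ∈ S ∧ pvAllowedB q.1 q.2 = false ∧
      ∀ p ∈ S, pvAllowedB p.1 p.2 = false → q.1 ≤ p.1 := by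
  induction S with
  | nil => intro _ q h; cases h
  | cons p rest ih =>
    intro hs q h
    obtain ⟨r, v⟩ := p
    rw [List.pairwise_cons] at hs
    by_cases ha : pvAllowedB r v
    · rw [pvFirstFail, if_pos ha] at h
      obtain ⟨hmem, hfail, hmin⟩ := ih hs.2 q h
      refine ⟨List.mem_cons_of_mem _ hmem, hfail, ?_⟩
      intro x hx hxf
      rcases List.mem_cons.mp hx with rfl | hx'
      · rw [ha] at hxf; cases hxf
      · exact hmin x hx' hxf
    · rw [pvFirstFail, if_neg ha] at h
      injection h with h; subst h
      refine ⟨List.mem_cons_self, by simpa using ha, ?_⟩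
      intro x hx _
      rcases List.mem_cons.mp hx with rfl | hx'
      · exact le_refl _
      · exact le_of_lt (hs.1 x hx')

theorem mem_pvItems (acl : List (String × String)) : ∀ (seen : List String) (k : String) (v : String),
    (k, v) ∈ pvItems acl seen ↔ (k ∉ seen ∧ (PySem.Dict.mk acl).get? k = some v) := by
  induction acl with
  | nil => intro seen k v; simp [pvItems, PySem.Dict.get?]
  | cons kv rest ih =>
    intro seen k v
    obtain ⟨k0, v0⟩ := kv
    rw [PySem.Dict.get?_mk_cons]
    by_cases hk : k0 ∈ seen
    · rw [pvItems, if_pos hk, ih]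
      by_cases hkk : k0 = k
      · subst hkk; simp [hk]
      · simp [beq_eq_false_iff_ne.mpr hkk]
    · rw [pvItems, if_neg hk]
      by_cases hkk : k0 = k
      · subst hkk
        constructor
        · intro hmem
          rcases List.mem_cons.mp hmem with heq | h2
          · rw [Prod.mk.injEq] at heq
            obtain ⟨-, rfl⟩ := heq
            exact ⟨hk, by simp⟩
          · exact absurd (((ih (k0 :: seen) k0 v).mp h2).1) (by simp)
        · rintro ⟨-, hv⟩
          simp only [BEq.rfl, if_true, Option.some.injEq] at hv
          subst hv
          exact List.mem_cons_self
      · have hbeq : (k0 == k) = false := beq_eq_false_iff_ne.mpr hkk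
        constructor
        · intro hmem
          rcases List.mem_cons.mp hmem with heq | h2
          · rw [Prod.mk.injEq] at heq
            exact absurd heq.1.symm hkk
          · obtain ⟨hns, hg⟩ := (ih (k0 :: seen) k v).mp h2
            refine ⟨fun hm => hns (List.mem_cons_of_mem _ hm), ?_⟩
            rw [hbeq]; simpa using hg
        · rintro ⟨hns, hg⟩
          rw [hbeq] at hg
          simp only [Bool.false_eq_true, if_false] at hg
          refine List.mem_cons_of_mem _ ((ih (k0 :: seen) k v).mpr ⟨?_, hg⟩)
          intro hm
          rcases List.mem_cons.mp hm with rfl | hm'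
          · exact hkk rfl
          · exact hns hm'

theorem pvRank_eq_some_iff (k : String) (r : Int) :
    pvRank k = some r ↔ (k, r) ∈ pvRankPairs := by
  rw [pvRank, PySem.Dict.get?_eq_some_iff_mem_items _ _ _ (by decide)]

theorem pvCand_eq_some (kv : String × String) (p : Int × String) :
    pvCand kv = some p ↔ (pvRank kv.1 = some p.1 ∧ pvAllowedB p.1 kv.2 = false ∧ p.2 = kv.2) := by
  obtain ⟨p1, p2⟩ := p
  cases h : pvRank kv.1 with
  | none => simp [pvCand, h]
  | some r =>
    simp only [pvCand, h, Option.some.injEq]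
    by_cases ha : pvAllowedB r kv.2
    · rw [if_pos ha]
      constructor
      · intro hh; exact absurd hh (by simp)
      · rintro ⟨rfl, h2, -⟩
        rw [ha] at h2
        exact absurd h2 (by decide)
    · rw [if_neg ha]
      constructor
      · intro hh
        injection hh with hh
        rw [Prod.mk.injEq] at hh
        obtain ⟨rfl, hh2⟩ := hh
        subst hh2
        exact ⟨rfl, by simpa using ha, rfl⟩
      · rintro ⟨rfl, -, h3⟩
        rw [h3]

theorem val_of_get? (acl : List (String × String)) (k : String) (v : String)
    (h : (PySem.Dict.mk acl).get? k = some v) : pvVal acl k = v := by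
  rw [pvVal, PySem.Dict.getD_eq_get?_getD, h]; rfl

theorem get?_of_val_ne (acl : List (String × String)) (k : String)
    (h : pvVal acl k ≠ "") : (PySem.Dict.mk acl).get? k = some (pvVal acl k) := by
  have h' := h
  rw [pvVal, PySem.Dict.getD_eq_get?_getD] at h'
  cases hh : (PySem.Dict.mk acl).get? k with
  | none => rw [hh] at h'; exact absurd rfl h'
  | some w => rw [pvVal, PySem.Dict.getD_eq_get?_getD, hh]; rfl

theorem pvAllowedB_empty (r : Int) : pvAllowedB r "" = true := by
  simp [pvAllowedB]

theorem mem_C_iff (acl : List (String × String)) (p : Int × String) :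
    p ∈ (pvItems acl []).filterMap pvCand ↔ (p ∈ pvS acl ∧ pvAllowedB p.1 p.2 = false) := by
  rw [List.mem_filterMap]
  constructor
  · rintro ⟨kv, hmem, hcand⟩
    obtain ⟨hrank, hfail, hval⟩ := (pvCand_eq_some kv p).mp hcand
    have hget := ((mem_pvItems acl [] kv.1 kv.2).mp (by simpa using hmem)).2
    have hv : pvVal acl kv.1 = kv.2 := val_of_get? _ _ _ hget
    have hpr : (kv.1, p.1) ∈ pvRankPairs := (pvRank_eq_some_iff _ _).mp hrank
    refine ⟨?_, by rw [hval]; exact hfail⟩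
    rw [pvS, List.mem_map]
    exact ⟨(kv.1, p.1), hpr, by rw [hv]; exact Prod.ext rfl hval.symm⟩
  · rintro ⟨hmem, hfail⟩
    rw [pvS, List.mem_map] at hmem
    obtain ⟨a, ha, rfl⟩ := hmem
    have hne : pvVal acl a.1 ≠ "" := by
      intro he
      rw [he] at hfail
      rw [pvAllowedB_empty] at hfail
      cases hfail
    have hget := get?_of_val_ne acl a.1 hne
    refine ⟨(a.1, pvVal acl a.1), ?_, ?_⟩
    · exact (mem_pvItems acl [] a.1 _).mpr ⟨by simp, hget⟩
    · exact (pvCand_eq_some _ _).mpr ⟨(pvRank_eq_some_iff _ _).mpr (by simpa using ha), hfail, rfl⟩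

theorem S_pairwise (acl : List (String × String)) :
    (pvS acl).Pairwise (fun p q => p.1 < q.1) := by
  rw [pvS, List.pairwise_map]
  have h : List.Pairwise (fun (a b : String × Int) => a.2 < b.2) pvRankPairs := by decide
  exact h.imp (fun hab => hab)

theorem S_fst_inj (acl : List (String × String)) (p p' : Int × String)
    (hp : p ∈ pvS acl) (hp' : p' ∈ pvS acl) (h : p.1 = p'.1) : p = p' := by
  rw [pvS, List.mem_map] at hp hp'
  obtain ⟨a, ha, rfl⟩ := hp
  obtain ⟨b, hb, rfl⟩ := hp'
  have hkey : ∀ x ∈ pvRankPairs, ∀ y ∈ pvRankPairs, x.2 = y.2 → x = y := by decide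
  rw [hkey a ha b hb h]

theorem combine (acl : List (String × String)) :
    ((pvItems acl []).filterMap pvCand).foldl pvMinPair none = pvFirstFail (pvS acl) := by
  cases hff : pvFirstFail (pvS acl) with
  | none =>
    have hall := (ff_none _).mp hff
    have hC : (pvItems acl []).filterMap pvCand = [] := by
      rw [List.eq_nil_iff_forall_not_mem]
      intro p hp
      obtain ⟨hmem, hfail⟩ := (mem_C_iff acl p).mp hp
      rw [hall p hmem] at hfail; cases hfail
    rw [hC]; rfl
  | some q' =>
    obtain ⟨hq'S, hq'fail, hq'min⟩ := ff_some _ (S_pairwise acl) q' hff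
    have hq'C : q' ∈ (pvItems acl []).filterMap pvCand := (mem_C_iff acl q').mpr ⟨hq'S, hq'fail⟩
    cases hmr : ((pvItems acl []).filterMap pvCand).foldl pvMinPair none with
    | none =>
      have := (minRun_none _ _).mp hmr
      rw [this.2] at hq'C; cases hq'C
    | some q =>
      obtain ⟨h1, h2, _⟩ := minRun_some _ none q hmr
      have hqC : q ∈ (pvItems acl []).filterMap pvCand := by
        rcases h1 with he | hm
        · cases he
        · exact hm
      obtain ⟨hqS, hqfail⟩ := (mem_C_iff acl q).mp hqC
      have hle1 : q.1 ≤ q'.1 := h2 q' hq'C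
      have hle2 : q'.1 ≤ q.1 := hq'min q hqS hqfail
      rw [S_fst_inj acl q q' hqS hq'S (le_antisymm hle1 hle2)]

-- condition bridges: B's _allowed test restated as A's guard condition, per rank
theorem alw0 (w : String) : (pvAllowedB 0 w = true) ↔ ¬(w ≠ "") := by
  by_cases h : w = "" <;> simp [pvAllowedB, h]
theorem alw1 (w : String) : (pvAllowedB 1 w = true) ↔ ¬(w ≠ "") := by
  by_cases h : w = "" <;> simp [pvAllowedB, h]
theorem alw2 (w : String) : (pvAllowedB 2 w = true) ↔ ¬(w ≠ "") := by
  by_cases h : w = "" <;> simp [pvAllowedB, h]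
theorem alw3 (w : String) : (pvAllowedB 3 w = true) ↔ ¬(w ≠ "") := by
  by_cases h : w = "" <;> simp [pvAllowedB, h]
theorem alw4 (w : String) : (pvAllowedB 4 w = true) ↔ ¬(w ≠ "") := by
  by_cases h : w = "" <;> simp [pvAllowedB, h]
theorem alw5 (w : String) : (pvAllowedB 5 w = true) ↔ ¬(w ≠ "") := by
  by_cases h : w = "" <;> simp [pvAllowedB, h]
theorem alw6 (w : String) : (pvAllowedB 6 w = true) ↔ ¬(w ≠ "") := by
  by_cases h : w = "" <;> simp [pvAllowedB, h]
theorem alw7 (w : String) : (pvAllowedB 7 w = true) ↔ ¬(w ≠ "") := by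
  by_cases h : w = "" <;> simp [pvAllowedB, h]
theorem alw8 (w : String) : (pvAllowedB 8 w = true) ↔ ¬(w ≠ "") := by
  by_cases h : w = "" <;> simp [pvAllowedB, h]
theorem alw9 (w : String) : (pvAllowedB 9 w = true) ↔ ¬(w ≠ "") := by
  by_cases h : w = "" <;> simp [pvAllowedB, h]
theorem alw10 (w : String) : (pvAllowedB 10 w = true) ↔ ¬(w ≠ "") := by
  by_cases h : w = "" <;> simp [pvAllowedB, h]
theorem alw11 (w : String) :
    (pvAllowedB 11 w = true) ↔ ¬(w ≠ "" ∧ w ≠ "any" ∧ w ≠ "http") := by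
  by_cases h : w = "" <;> simp [pvAllowedB, h]
  tauto
theorem alw12 (w : String) : (pvAllowedB 12 w = true) ↔ ¬(w ≠ "" ∧ w ≠ "any") := by
  by_cases h : w = "" <;> simp [pvAllowedB, h]
theorem alw13 (w : String) :
    (pvAllowedB 13 w = true) ↔ ¬(w ≠ "" ∧ w ≠ "ip" ∧ w ≠ "tcp" ∧ w ≠ "udp") := by
  by_cases h : w = "" <;> simp [pvAllowedB, h]
  tauto
theorem alw14 (w : String) : (pvAllowedB 14 w = true) ↔ ¬(w ≠ "" ∧ w ≠ "any") := by
  by_cases h : w = "" <;> simp [pvAllowedB, h]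

-- pvMessage on each literal rank
theorem msgNone : pvMessage none = "" := rfl
theorem msg0 (v : String) :
    pvMessage (some (0, v)) = "IP Intelligence match criteria currently not supported" := rfl
theorem msg1 (v : String) :
    pvMessage (some (1, v)) = "IP Intelligence match criteria currently not supported" := rfl
theorem msg2 (v : String) :
    pvMessage (some (2, v)) = "IP Intelligence match criteria currently not supported" := rfl
theorem msg3 (v : String) :
    pvMessage (some (3, v)) = "Domain match criteria currently not supported" := rfl
theorem msg4 (v : String) :
    pvMessage (some (4, v)) = "Domain match criteria currently not supported" := rfl
theorem msg5 (v : String) :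
    pvMessage (some (5, v)) = "Domain match criteria currently not supported" := rfl
theorem msg6 (v : String) :
    pvMessage (some (6, v)) = "Geo Location match criteria currently not supported" := rfl
theorem msg7 (v : String) :
    pvMessage (some (7, v)) = "Geo Location match criteria currently not supported" := rfl
theorem msg8 (v : String) :
    pvMessage (some (8, v)) = "Geo Location match criteria currently not supported" := rfl
theorem msg9 (v : String) :
    pvMessage (some (9, v)) = "IP/Subnet match criteria currently not supported" := rfl
theorem msg10 (v : String) :
    pvMessage (some (10, v)) = "IP/Subnet match criteria currently not supported" := rfl
theorem msg11 (v : String) :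
    pvMessage (some (11, v)) = "Application match criteria " ++ v ++ " currently not supported" := rfl
theorem msg12 (v : String) :
    pvMessage (some (12, v)) = "Interface match criteria " ++ v ++ " currently not supported" := rfl
theorem msg13 (v : String) :
    pvMessage (some (13, v)) =
      "Supported Protocol match criteria are ip, tcp and udp. " ++
        "All others currently not supported" := rfl
theorem msg14 (v : String) :
    pvMessage (some (14, v)) = "DSCP match criteria " ++ v ++ " currently not supported" := rfl

theorem unfoldA (acl : List (String × String)) :
    verify_acl_rule_match_criteria_is_supported acl = pvMessage (pvFirstFail (pvS acl)) := by
  simp only [verify_acl_rule_match_criteria_is_supported, pvUnsupportedKeys, pvUnsupportedNames,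
    PySem.List.enumerate, pvLoopA, pvAfterLoopA,
    pvS, pvRankPairs, List.map, pvVal, pvFirstFail, apply_ite pvMessage,
    msgNone, msg0, msg1, msg2, msg3, msg4, msg5, msg6, msg7, msg8, msg9, msg10, msg11, msg12,
    msg13, msg14, alw0, alw1, alw2, alw3, alw4, alw5, alw6, alw7, alw8, alw9, alw10, alw11,
    alw12, alw13, alw14, ite_not]
  repeat' refine if_congr Iff.rfl ?_ ?_
  all_goals rfl

-- ===== VERDICT (by name: the statement is the Claim_ definition above) =====
theorem verify_acl_rule_match_criteria_is_supported_spec : Claim_equal_verify_acl_rule_match_criteria_is_supported := by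
  intro acl _
  unfold Spec_verify_acl_rule_match_criteria_is_supported
  rw [unfoldA, verify_acl_rule_match_criteria_is_supported_alt, foldl_step_eq, combine]
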